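-- pv_equiv track=rewrite | github.com/masonwang025/pitorch | tools/shard_weights.py | layer_assignment
-- ===== SOURCE A (Python) =====
-- def layer_assignment(n_layers, world_size):
--     """Assign layers to compute ranks (all ranks except the last).
--     Last rank (world_size-1) gets embed + head, no layers.
--     Returns list of (l_start, l_end, has_embed, has_head) per rank."""
--     compute_ranks = world_size - 1
--     base = n_layers // compute_ranks
--     extra = n_layers % compute_ranks
--
--     assignments = []
--     offset = 0
--     for r in range(compute_ranks):
--         count = base + (1 if r < extra else 0)
--         assignments.append((offset, offset + count, 0, 0))
--         offset += count
--
--     # Last rank: embed + head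
--     assignments.append((n_layers, n_layers, 1, 1))
--     return assignments
-- ===== SOURCE B (Python) =====
-- def layer_assignment(n_layers, world_size):
--     """Assign layers to compute ranks (all ranks except the last).
--     Last rank (world_size-1) gets embed + head, no layers.
--     Returns list of (l_start, l_end, has_embed, has_head) per rank."""
--     compute_ranks = world_size - 1
--     base = n_layers // compute_ranks
--     extra = n_layers % compute_ranks
--     return [
--         (base * r + min(r, extra), base * (r + 1) + min(r + 1, extra), 0, 0)
--         for r in range(compute_ranks)
--     ] + [(n_layers, n_layers, 1, 1)]
-- ===== Notes on version B (the rewrite author's own statement) =====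
-- stated objective: alternative
-- what changed: The running offset accumulator is replaced by independent closed-form per-rank arithmetic (l_start = base*r + min(r, extra)), so each rank's range is computed directly from its index instead of being threaded through the loop.
import Mathlib
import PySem

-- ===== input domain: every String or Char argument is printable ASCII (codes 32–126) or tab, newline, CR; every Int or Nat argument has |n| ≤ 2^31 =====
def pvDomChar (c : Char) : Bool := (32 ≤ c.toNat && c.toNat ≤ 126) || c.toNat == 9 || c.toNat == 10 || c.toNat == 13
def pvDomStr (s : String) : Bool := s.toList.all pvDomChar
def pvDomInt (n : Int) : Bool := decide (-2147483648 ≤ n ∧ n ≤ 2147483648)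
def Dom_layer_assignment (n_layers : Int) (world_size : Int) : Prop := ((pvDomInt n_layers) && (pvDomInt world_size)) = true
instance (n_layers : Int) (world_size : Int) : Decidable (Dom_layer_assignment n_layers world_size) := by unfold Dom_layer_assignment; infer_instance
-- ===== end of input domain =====

-- B replaces the running offset accumulator by closed-form per-rank arithmetic; objective: alternative decomposition.

-- ===== PORT A =====
def layer_assignment (n_layers : Int) (world_size : Int) : List (Int × Int × Int × Int) :=
  let compute_ranks := world_size - 1
  let base := PySem.Int.floordiv n_layers compute_ranks
  let extra := PySem.Int.mod n_layers compute_ranks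
  let st := (PySem.List.pyRange 0 compute_ranks 1).foldl
    (fun (st : List (Int × Int × Int × Int) × Int) r =>
      let count := base + (if r < extra then 1 else 0)
      (st.1 ++ [(st.2, st.2 + count, 0, 0)], st.2 + count))
    ([], 0)
  st.1 ++ [(n_layers, n_layers, 1, 1)]

-- ===== PORT B =====
def layer_assignment_alt (n_layers : Int) (world_size : Int) : List (Int × Int × Int × Int) :=
  let compute_ranks := world_size - 1
  let base := PySem.Int.floordiv n_layers compute_ranks
  let extra := PySem.Int.mod n_layers compute_ranks
  ((PySem.List.pyRange 0 compute_ranks 1).map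
    (fun r => (base * r + min r extra, base * (r + 1) + min (r + 1) extra, 0, 0)))
  ++ [(n_layers, n_layers, 1, 1)]

-- ===== PRECONDITION & SPEC =====
-- Pre_ excludes world_size = 1, where the Python A raises ZeroDivisionError (compute_ranks = 0).
def Pre_layer_assignment (n_layers : Int) (world_size : Int) : Prop := world_size ≠ 1
instance (n_layers : Int) (world_size : Int) : Decidable (Pre_layer_assignment n_layers world_size) := by unfold Pre_layer_assignment; infer_instance
def pvWitness_layer_assignment : Int × Int := (10, 4)

def Spec_layer_assignment (n_layers : Int) (world_size : Int) (out : List (Int × Int × Int × Int)) : Prop := out = layer_assignment_alt n_layers world_size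
instance (n_layers : Int) (world_size : Int) (out : List (Int × Int × Int × Int)) : Decidable (Spec_layer_assignment n_layers world_size out) := by unfold Spec_layer_assignment; infer_instance

-- ===== CLAIM (what is proved, stated in full; the proofs are below) =====
def Claim_equal_layer_assignment : Prop := ∀ (n_layers : Int) (world_size : Int), Dom_layer_assignment n_layers world_size → Pre_layer_assignment n_layers world_size → Spec_layer_assignment n_layers world_size (layer_assignment n_layers world_size)

-- ===== LEMMAS AND PROOFS =====

-- Loop invariant: A's foldl over range(0, b) produces B's closed-form tuples, with offset = base*b + min b extra.
theorem la_foldl_closed (base extra : Int) (hx : 0 ≤ extra) :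
    ∀ (b : Int), 0 ≤ b →
    (PySem.List.pyRange 0 b 1).foldl
      (fun (st : List (Int × Int × Int × Int) × Int) r =>
        let count := base + (if r < extra then 1 else 0)
        (st.1 ++ [(st.2, st.2 + count, 0, 0)], st.2 + count))
      ([], 0)
    = ((PySem.List.pyRange 0 b 1).map
        (fun r => (base * r + min r extra, base * (r + 1) + min (r + 1) extra, 0, 0)),
       base * b + min b extra) := by
  intro b hb
  induction b, hb using Int.le_induction with
  | base =>
      simp [PySem.List.pyRange_one_eq_nil]
      omega
  | succ b hb ih =>
      have hmul : base * (b + 1) = base * b + base := by ring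
      rw [PySem.List.pyRange_one_succ_right (by omega)]
      rw [List.foldl_append, List.map_append, ih]
      simp only [List.foldl_cons, List.foldl_nil, List.map_cons, List.map_nil,
        Prod.mk.injEq, hmul, min_def]
      split_ifs <;> simp_all <;> omega

theorem layer_assignment_eq (n_layers world_size : Int) (hw : world_size ≠ 1) :
    layer_assignment n_layers world_size = layer_assignment_alt n_layers world_size := by
  simp only [layer_assignment, layer_assignment_alt]
  rcases lt_or_gt_of_ne (show world_size - 1 ≠ 0 by omega) with h | h
  · rw [PySem.List.pyRange_one_eq_nil (by omega)]
    simp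
  · have hx : 0 ≤ PySem.Int.mod n_layers (world_size - 1) := by
      have := PySem.Int.mod_nonneg n_layers h
      exact this
    rw [la_foldl_closed _ _ hx _ (by omega)]

-- ===== VERDICT (by name: the statement is the Claim_ definition above) =====
theorem layer_assignment_spec : Claim_equal_layer_assignment := by
  intro n w _ hpre
  exact layer_assignment_eq n w hpre
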